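-- pv_equiv track=rewrite | github.com/pushedrumex/BJAG | 프로그래머스/3/68646. 풍선 터트리기/풍선 터트리기.py | solution
-- ===== SOURCE A (Python) =====
-- from heapq import heappush, heappop
--
-- def solution(a):
--     N = len(a)
--     answer = 0
--     left_min = 10**9
--     visited = {}
--     hq = []
--     for i in range(N):
--         visited[a[i]] = True
--         heappush(hq, a[i])
--
--     for i in range(N):
--         n = a[i]
--         left_min = min(left_min, n)
--         while not visited[hq[0]]:
--             heappop(hq)
--         right_min = hq[0]
--         if not (left_min < n and right_min < n):
--             answer += 1
--         visited[n] = False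
--     return answer
-- ===== SOURCE B (Python) =====
-- def solution(a):
--     # A value is a candidate for the "right minimum" until it has been seen once
--     # (the original keys its visited dict by value), so only FIRST occurrences count.
--     # One forward pass marks first occurrences, one backward pass builds their suffix
--     # minima, one forward pass counts: O(n) total.
--     seen = set()
--     first = []
--     for x in a:
--         if x in seen:
--             first.append(False)
--         else:
--             first.append(True)
--             seen.add(x)
--     suf = [None] * len(a)
--     m = None
--     for i in range(len(a) - 1, -1, -1):
--         if first[i]:
--             m = a[i] if m is None else min(m, a[i])
--         suf[i] = m
--     answer = 0
--     left_min = 10**9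
--     for x, s in zip(a, suf):
--         left_min = min(left_min, x)
--         if not (left_min < x and s is not None and s < x):
--             answer += 1
--     return answer
-- ===== Notes on version B (the rewrite author's own statement) =====
-- stated objective: faster
-- what changed: Replaces the min-heap with value-keyed lazy deletion (visited dict + repeated heappop) by a suffix-minimum array built in one backward pass plus a running prefix minimum in one forward pass.
import Mathlib
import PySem

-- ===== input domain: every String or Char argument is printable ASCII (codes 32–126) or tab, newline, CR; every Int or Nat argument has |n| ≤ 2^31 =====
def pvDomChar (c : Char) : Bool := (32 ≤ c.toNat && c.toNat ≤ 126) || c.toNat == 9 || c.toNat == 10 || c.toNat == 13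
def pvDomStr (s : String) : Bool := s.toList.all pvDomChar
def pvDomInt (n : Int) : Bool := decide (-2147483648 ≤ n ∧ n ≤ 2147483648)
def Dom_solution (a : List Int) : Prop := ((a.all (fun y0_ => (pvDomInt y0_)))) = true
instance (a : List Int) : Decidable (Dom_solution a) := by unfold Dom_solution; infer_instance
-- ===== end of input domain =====

-- B replaces A's min-heap with value-keyed lazy deletion by three linear passes (first-occurrence
-- marks, suffix minima over them, a counting pass).


-- ===== PORT A =====
-- heapq is modelled as a sorted list: heappush = ordered insert, reading index zero = head (the minimum),
-- heappop = drop the head — the observable semantics (min at index 0, pop removes the min)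
-- is exactly heapq's; only the unobserved internal layout of the list differs.
def heappushA (hq : List Int) (x : Int) : List Int :=
  PySem.List.insertBy (fun a b => decide (a < b)) x hq

-- the lazy-deletion while loop: keep popping while the head value is marked dead
def popWhileA (visited : PySem.Dict Int Bool) : List Int → List Int
  | [] => []  -- here Python's read of the heap head would raise IndexError (outside Pre_)
  | x :: rest => if visited.getD x false = false then popWhileA visited rest else x :: rest

def stepA (s : Int × Int × PySem.Dict Int Bool × List Int) (n : Int) :
    Int × Int × PySem.Dict Int Bool × List Int :=
  let answer := s.1
  let left_min := min s.2.1 n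
  let hq := popWhileA s.2.2.1 s.2.2.2
  let right_min := hq.headD 0   -- the heap head; the default is never read under Pre_
  let answer := if ¬(left_min < n ∧ right_min < n) then answer + 1 else answer
  (answer, left_min, s.2.2.1.insert n false, hq)

def solution (a : List Int) : Int :=
  let N : Int := (a.length : Int)
  let init := (PySem.List.pyRange 0 N 1).foldl
      (fun (s : PySem.Dict Int Bool × List Int) i =>
        (s.1.insert (PySem.List.pyGetD a i 0) true, heappushA s.2 (PySem.List.pyGetD a i 0)))
      (PySem.Dict.empty, [])
  let r := (PySem.List.pyRange 0 N 1).foldl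
      (fun s i => stepA s (PySem.List.pyGetD a i 0))
      ((0 : Int), (10:Int) ^ 9, init.1, init.2)
  r.1

-- ===== PORT B =====
-- backward pass of Source B: suffix minima over the first-occurrence entries (none = no candidate)
def sufFirstB : List (Int × Bool) → List (Option Int)
  | [] => []
  | (x, f) :: rest =>
      let s := sufFirstB rest
      let m0 : Option Int := match s with | [] => none | m :: _ => m
      let m : Option Int :=
        if f then (match m0 with | none => some x | some y => some (min x y)) else m0
      m :: s

def solution_alt (a : List Int) : Int :=
  let fb := a.foldl
      (fun (st : PySem.Set Int × List Bool) x =>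
        if PySem.Set.contains st.1 x then (st.1, st.2 ++ [false])
        else (PySem.Set.add st.1 x, st.2 ++ [true]))
      (PySem.Set.empty, [])
  let suf := sufFirstB (a.zip fb.2)
  let r := (a.zip suf).foldl
      (fun (s : Int × Int) p =>
        let left_min := min s.2 p.1
        ((if (decide (left_min < p.1) &&
              (match p.2 with | none => false | some v => decide (v < p.1))) = false
          then s.1 + 1 else s.1), left_min))
      ((0 : Int), (10:Int) ^ 9)
  r.1

-- ===== PRECONDITION & SPEC =====
-- Pre_ excludes exactly the inputs on which A raises IndexError: when the LAST element's value
-- already occurred earlier, A's value-keyed visited dict has marked it dead in advance, so at the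
-- last step the lazy deletion pops the whole heap and the head read fails. A returns on every other input.
def Pre_solution (a : List Int) : Prop := ∀ h : a ≠ [], a.getLast h ∉ a.dropLast
instance (a : List Int) : Decidable (Pre_solution a) := by unfold Pre_solution; infer_instance
def pvWitness_solution : List Int := [9, -1, -5]

def Spec_solution (a : List Int) (out : Int) : Prop := out = solution_alt a
instance (a : List Int) (out : Int) : Decidable (Spec_solution a out) := by unfold Spec_solution; infer_instance

-- ===== CLAIM (what is proved, stated in full; the proofs are below) =====
def Claim_equal_solution : Prop := ∀ (a : List Int), Dom_solution a → Pre_solution a → Spec_solution a (solution a)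

-- ===== LEMMAS AND PROOFS =====

-- the common reference: left_min, the list of already-processed values, the remaining suffix
def optLtB : Option Int → Int → Bool
  | none, _ => false
  | some v, n => decide (v < n)

-- right minimum of the reference: least not-yet-seen value in the remaining suffix
def rmRef (p s : List Int) : Option Int := (s.filter (fun v => !(decide (v ∈ p)))).min?

def countRef : Int → List Int → List Int → Int
  | _, _, [] => 0
  | lm, p, n :: t =>
      (if (decide (min lm n < n) && optLtB (rmRef p (n :: t)) n) = false then 1 else 0)
        + countRef (min lm n) (p ++ [n]) t

lemma filter_seen_extend (p : List Int) (n : Int) (t : List Int) (hnp : n ∈ p) :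
    t.filter (fun v => !(decide (v ∈ p))) = t.filter (fun v => !(decide (v ∈ p ++ [n]))) := by
  apply List.filter_congr
  intro v _
  by_cases hv : v ∈ p
  · simp [hv]
  · have hv2 : v ∉ p ++ [n] := by
      simp only [List.mem_append, List.mem_singleton]
      rintro (h | rfl)
      · exact hv h
      · exact hv hnp
    simp [hv, hv2]

lemma rmRef_cons (p : List Int) (n : Int) (t : List Int) :
    rmRef p (n :: t) =
      if n ∈ p then rmRef (p ++ [n]) t
      else some (match rmRef (p ++ [n]) t with | none => n | some y => min n y) := by
  by_cases hnp : n ∈ p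
  · have hfil : (n :: t).filter (fun v => !(decide (v ∈ p))) = t.filter (fun v => !(decide (v ∈ p))) := by
      simp [hnp]
    simp only [rmRef, hfil]
    rw [if_pos hnp, filter_seen_extend p n t hnp]
  · have hpred2 : ∀ v ∈ t, (!(decide (v ∈ p ++ [n]))) = true → (!(decide (v ∈ p))) = true := by
      intro v _ hv
      simp only [Bool.not_eq_true', decide_eq_false_iff_not, List.mem_append] at hv ⊢
      exact fun h => hv (Or.inl h)
    have hpred1 : ∀ v ∈ t, (!(decide (v ∈ p))) = true → v ≠ n → (!(decide (v ∈ p ++ [n]))) = true := by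
      intro v _ hv hvn
      simp only [Bool.not_eq_true', decide_eq_false_iff_not, List.mem_append,
        List.mem_singleton] at hv ⊢
      rintro (h | rfl)
      · exact hv h
      · exact hvn rfl
    have hfil : (n :: t).filter (fun v => !(decide (v ∈ p)))
        = n :: t.filter (fun v => !(decide (v ∈ p))) := by
      simp [hnp]
    simp only [rmRef, hfil]
    rw [if_neg hnp, List.min?_cons]
    cases h1 : (t.filter (fun v => !(decide (v ∈ p)))).min? with
    | none =>
        have ht1 : t.filter (fun v => !(decide (v ∈ p))) = [] := List.min?_eq_none_iff.mp h1
        have ht2 : t.filter (fun v => !(decide (v ∈ p ++ [n]))) = [] := by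
          rw [List.filter_eq_nil_iff] at ht1 ⊢
          intro v hv hv2
          exact ht1 v hv (hpred2 v hv hv2)
        rw [ht2]
        rfl
    | some m1 =>
        obtain ⟨hm1mem, hm1le⟩ := List.min?_eq_some_iff.mp h1
        rw [List.mem_filter] at hm1mem
        cases h2 : (t.filter (fun v => !(decide (v ∈ p ++ [n])))).min? with
        | none =>
            have ht2 := List.filter_eq_nil_iff.mp (List.min?_eq_none_iff.mp h2)
            have hm1n : m1 = n := by
              by_contra hne
              exact ht2 m1 hm1mem.1 (hpred1 m1 hm1mem.1 hm1mem.2 hne)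
            simp [hm1n]
        | some m2 =>
            obtain ⟨hm2mem, _⟩ := List.min?_eq_some_iff.mp h2
            rw [List.mem_filter] at hm2mem
            have hm1m2 : m1 ≤ m2 := by
              apply hm1le
              rw [List.mem_filter]
              exact ⟨hm2mem.1, hpred2 m2 hm2mem.1 hm2mem.2⟩
            have hm2m1 : min n m2 ≤ min n m1 := by
              by_cases hm1n : m1 = n
              · subst hm1n; omega
              · have : m2 ≤ m1 := by
                  apply (List.min?_eq_some_iff.mp h2).2
                  rw [List.mem_filter]
                  exact ⟨hm1mem.1, hpred1 m1 hm1mem.1 hm1mem.2 hm1n⟩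
                omega
            have : min n m1 = min n m2 := by omega
            simp [this]

-- ---- B side ----

def marksB : List Int → List Int → List Bool
  | _, [] => []
  | p, x :: t => (!(decide (x ∈ p))) :: marksB (p ++ [x]) t

lemma foldB (s : List Int) : ∀ (p : List Int) (F : List Bool),
    s.foldl (fun (st : PySem.Set Int × List Bool) x =>
        if PySem.Set.contains st.1 x then (st.1, st.2 ++ [false])
        else (PySem.Set.add st.1 x, st.2 ++ [true]))
      (PySem.Set.ofList p, F)
      = (PySem.Set.ofList (p ++ s), F ++ marksB p s) := by
  induction s with
  | nil => intro p F; simp [marksB]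
  | cons x t ih =>
      intro p F
      simp only [List.foldl_cons, marksB]
      by_cases hx : x ∈ p
      · have hc : PySem.Set.contains (PySem.Set.ofList p) x = true :=
          (PySem.Set.contains_iff _ _).mpr ((PySem.Set.mem_ofList _ _).mpr hx)
        have hofl : PySem.Set.ofList (p ++ [x]) = PySem.Set.ofList p := by
          rw [PySem.Set.ofList_append_singleton]
          exact PySem.Set.add_of_mem ((PySem.Set.mem_ofList _ _).mpr hx)
        simp only [hc, if_true]
        rw [← hofl, ih (p ++ [x]) (F ++ [false]), ← List.append_cons p x t,
          ← List.append_cons F false]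
        simp [hx]
      · have hc : PySem.Set.contains (PySem.Set.ofList p) x = false := by
          rw [← Bool.not_eq_true, PySem.Set.contains_iff]
          rw [PySem.Set.mem_ofList]
          exact hx
        have hofl : PySem.Set.ofList (p ++ [x]) = PySem.Set.add (PySem.Set.ofList p) x :=
          PySem.Set.ofList_append_singleton _ _
        simp only [hc, Bool.false_eq_true, if_false]
        rw [← hofl, ih (p ++ [x]) (F ++ [true]), ← List.append_cons p x t,
          ← List.append_cons F true]
        simp [hx]

-- the suffix-minimum list of the reference
def sufList : List Int → List Int → List (Option Int)
  | _, [] => []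
  | p, n :: t => rmRef p (n :: t) :: sufList (p ++ [n]) t

lemma headSufList (q t' : List Int) :
    (match sufList q t' with | [] => none | m :: _ => m) = rmRef q t' := by
  cases t' with
  | nil => simp [sufList, rmRef]
  | cons b u => simp [sufList]

lemma suf_eq (s : List Int) : ∀ p : List Int,
    sufFirstB (s.zip (marksB p s)) = sufList p s := by
  induction s with
  | nil => intro p; rfl
  | cons n t ih =>
      intro p
      simp only [marksB, List.zip_cons_cons, sufFirstB, sufList, ih (p ++ [n]), headSufList]
      by_cases hnp : n ∈ p
      · simp [hnp, rmRef_cons p n t]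
      · simp only [hnp, decide_false, Bool.not_false, if_true]
        rw [rmRef_cons p n t, if_neg hnp]
        cases rmRef (p ++ [n]) t <;> simp

lemma altLoop (s : List Int) : ∀ (p : List Int) (ans lm : Int),
    ((s.zip (sufList p s)).foldl
      (fun (st : Int × Int) q =>
        let left_min := min st.2 q.1
        ((if (decide (left_min < q.1) &&
              (match q.2 with | none => false | some v => decide (v < q.1))) = false
          then st.1 + 1 else st.1), left_min))
      (ans, lm)).1 = ans + countRef lm p s := by
  induction s with
  | nil => intro p ans lm; simp [sufList, countRef]
  | cons n t ih =>
      intro p ans lm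
      simp only [sufList, List.zip_cons_cons, List.foldl_cons]
      rw [ih (p ++ [n])]
      simp only [countRef]
      cases hrm : rmRef p (n :: t) <;>
        simp only [optLtB] <;> split <;> omega

theorem solution_alt_eq (a : List Int) : solution_alt a = countRef ((10:Int)^9) [] a := by
  unfold solution_alt
  rw [show (PySem.Set.empty : PySem.Set Int) = PySem.Set.ofList ([] : List Int) from rfl]
  rw [foldB a [] []]
  simp only [List.nil_append]
  rw [suf_eq a []]
  simpa using altLoop a [] 0 ((10:Int)^9)

-- ---- A side ----

lemma popWhileA_sublist (v : PySem.Dict Int Bool) (hq : List Int) :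
    (popWhileA v hq).Sublist hq := by
  induction hq with
  | nil => simp [popWhileA]
  | cons x r ih =>
      simp only [popWhileA]
      split
      · exact ih.cons x
      · exact List.Sublist.refl _

lemma mem_popWhileA (v : PySem.Dict Int Bool) : ∀ (hq : List Int) (x : Int),
    x ∈ hq → v.getD x false = true → x ∈ popWhileA v hq := by
  intro hq
  induction hq with
  | nil => intro x hx; simp at hx
  | cons y r ih =>
      intro x hx hv
      simp only [popWhileA]
      split
      · rename_i hy
        rcases List.mem_cons.mp hx with rfl | hxr
        · rw [hv] at hy; cases hy
        · exact ih x hxr hv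
      · exact hx

lemma popWhileA_head_true (v : PySem.Dict Int Bool) : ∀ (hq : List Int) (h : Int) (r : List Int),
    popWhileA v hq = h :: r → v.getD h false = true := by
  intro hq
  induction hq with
  | nil => intro h r hE; simp [popWhileA] at hE
  | cons y t ih =>
      intro h r hE
      simp only [popWhileA] at hE
      split at hE
      · exact ih h r hE
      · rename_i hy
        cases hE
        simpa using hy

-- main invariant for A's second loop
lemma loopA : ∀ (s p : List Int) (V : PySem.Dict Int Bool) (hq : List Int) (ans lm : Int),
    hq.Pairwise (· ≤ ·) →
    (∀ x ∈ hq, x ∈ p ++ s) →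
    (∀ v ∈ s, v ∉ p → v ∈ hq) →
    (∀ x ∈ hq, V.getD x false = !(decide (x ∈ p))) →
    (∀ ℓ, s.getLast? = some ℓ → ℓ ∉ p ∧ ℓ ∉ s.dropLast) →
    (s.foldl stepA (ans, lm, V, hq)).1 = ans + countRef lm p s := by
  intro s
  induction s with
  | nil => intro p V hq ans lm _ _ _ _ _; simp [countRef]
  | cons n t ih =>
      intro p V hq ans lm hPW hsub1 hsub2 hvis hlast
      have hne : (n :: t) ≠ ([] : List Int) := by simp
      obtain ⟨hℓp, hℓdl⟩ := hlast ((n :: t).getLast hne) (List.getLast?_eq_some_getLast hne)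
      set ℓ := (n :: t).getLast hne with hℓdef
      have hℓmem : ℓ ∈ n :: t := List.getLast_mem hne
      have hkeep : ∀ x ∈ hq, V.getD x false = true → x ∈ popWhileA V hq :=
        fun x hx => mem_popWhileA V hq x hx
      have hℓhq : ℓ ∈ hq := hsub2 ℓ hℓmem hℓp
      have hℓ' : ℓ ∈ popWhileA V hq := hkeep ℓ hℓhq (by rw [hvis ℓ hℓhq]; simp [hℓp])
      obtain ⟨h, r, hE⟩ : ∃ h r, popWhileA V hq = h :: r := by
        cases hqE : popWhileA V hq with
        | nil => rw [hqE] at hℓ'; cases hℓ'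
        | cons h r => exact ⟨h, r, rfl⟩
      have hsubl0 : (h :: r).Sublist hq := hE ▸ popWhileA_sublist V hq
      have hhT : V.getD h false = true := popWhileA_head_true V hq h r hE
      have hhin : h ∈ hq := hsubl0.mem List.mem_cons_self
      have hhp : h ∉ p := by
        have := hvis h hhin
        rw [hhT] at this
        simpa using this.symm
      have hhS : h ∈ n :: t := by
        rcases List.mem_append.mp (hsub1 h hhin) with hp' | hs
        · exact absurd hp' hhp
        · exact hs
      have hPW' : (h :: r).Pairwise (· ≤ ·) := hPW.sublist hsubl0
      have hrm : rmRef p (n :: t) = some h := by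
        rw [rmRef, List.min?_eq_some_iff]
        constructor
        · rw [List.mem_filter]
          exact ⟨hhS, by simp [hhp]⟩
        · intro b hb
          rw [List.mem_filter] at hb
          obtain ⟨hbt, hbp⟩ := hb
          have hbp' : b ∉ p := by simpa using hbp
          have hbhq : b ∈ hq := hsub2 b hbt hbp'
          have hb' : b ∈ h :: r := by
            have := hkeep b hbhq (by rw [hvis b hbhq]; simp [hbp'])
            rwa [hE] at this
          rcases List.mem_cons.mp hb' with rfl | hbr
          · exact le_refl b
          · exact (List.pairwise_cons.mp hPW').1 b hbr
      have hstep : stepA (ans, lm, V, hq) n =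
          ((if ¬(min lm n < n ∧ h < n) then ans + 1 else ans), min lm n, V.insert n false, h :: r) := by
        simp only [stepA, hE]
        rfl
      have hsub1' : ∀ x ∈ h :: r, x ∈ (p ++ [n]) ++ t := by
        intro x hx
        have := hsub1 x (hsubl0.mem hx)
        rwa [List.append_cons] at this
      have hsub2' : ∀ v ∈ t, v ∉ p ++ [n] → v ∈ h :: r := by
        intro v hv hvp
        have hvp' : v ∉ p := fun hh => hvp (List.mem_append.mpr (Or.inl hh))
        have hvhq : v ∈ hq := hsub2 v (List.mem_cons_of_mem _ hv) hvp'
        have := hkeep v hvhq (by rw [hvis v hvhq]; simp [hvp'])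
        rwa [hE] at this
      have hvis' : ∀ x ∈ h :: r, (V.insert n false).getD x false = !(decide (x ∈ p ++ [n])) := by
        intro x hx
        by_cases hxn : x = n
        · subst hxn
          simp only [PySem.Dict.getD, PySem.Dict.get?_insert_self]
          simp
        · have hne2 : (V.insert n false).getD x false = V.getD x false := by
            simp only [PySem.Dict.getD]
            rw [PySem.Dict.get?_insert_of_ne V false hxn]
          rw [hne2, hvis x (hsubl0.mem hx)]
          by_cases hxp : x ∈ p <;> simp [hxp, hxn]
      have hlast' : ∀ ℓ', t.getLast? = some ℓ' → ℓ' ∉ p ++ [n] ∧ ℓ' ∉ t.dropLast := by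
        intro ℓ' hℓ'
        have htne : t ≠ [] := by
          intro hteq
          rw [hteq] at hℓ'
          cases hℓ'
        have hsame : (n :: t).getLast? = some ℓ' := by
          cases t with
          | nil => exact absurd rfl htne
          | cons b u => rw [List.getLast?_cons_cons]; exact hℓ'
        have hℓℓ' : ℓ' = ℓ := by
          have h2 := List.getLast?_eq_some_getLast (l := n :: t) hne
          rw [hsame] at h2
          exact (Option.some_inj.mp h2)
        subst hℓℓ'
        have hdl : (n :: t).dropLast = n :: t.dropLast := List.dropLast_cons_of_ne_nil htne
        rw [hdl] at hℓdl
        have hℓn : ℓ ≠ n := fun hh => hℓdl (by rw [hh]; exact List.mem_cons_self)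
        have hℓt : ℓ ∉ t.dropLast := fun hh => hℓdl (List.mem_cons_of_mem _ hh)
        refine ⟨?_, hℓt⟩
        simp only [List.mem_append, List.mem_singleton]
        rintro (hh | hh)
        · exact hℓp hh
        · exact hℓn hh
      simp only [List.foldl_cons, hstep]
      rw [ih (p ++ [n]) (V.insert n false) (h :: r) _ _ hPW' hsub1' hsub2' hvis' hlast']
      simp only [countRef, hrm, optLtB]
      by_cases h1 : min lm n < n <;> by_cases h2 : h < n <;> simp [h1, h2] <;> omega

-- the first loop builds: visited = all-true dict over a, hq = sorted a
lemma dictAll (a : List Int) : ∀ (d : PySem.Dict Int Bool) (x : Int),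
    (a.foldl (fun d y => d.insert y true) d).getD x false =
      (if x ∈ a then true else d.getD x false) := by
  induction a with
  | nil => intro d x; simp
  | cons y t ih =>
      intro d x
      simp only [List.foldl_cons]
      rw [ih]
      by_cases hx : x = y
      · subst hx
        by_cases hxt : x ∈ t <;>
          simp [hxt, PySem.Dict.getD, PySem.Dict.get?_insert_self]
      · have hne : (d.insert y true).getD x false = d.getD x false := by
          simp only [PySem.Dict.getD]
          rw [PySem.Dict.get?_insert_of_ne d true hx]
        by_cases hxt : x ∈ t <;> simp [hxt, hx, hne]

lemma heapBuild (a : List Int) :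
    a.foldl (fun h x => heappushA h x) [] = PySem.List.sorted a (fun x => x) false := by
  rw [PySem.List.sorted_eq_foldl_insertBy]
  rfl

-- ===== VERDICT (by name: the statement is the Claim_ definition above) =====
theorem solution_spec : Claim_equal_solution := by
  intro a _hDom hPre
  unfold Spec_solution
  rw [solution_alt_eq]
  unfold solution
  simp only
  rw [PySem.List.foldl_pyRange_zero_pyGetD' a 0
      (fun (s : PySem.Dict Int Bool × List Int) x =>
        (s.1.insert x true, heappushA s.2 x)) (PySem.Dict.empty, []),
      PySem.List.foldl_pyRange_zero_pyGetD' a 0 (fun s x => stepA s x)]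
  rw [PySem.List.foldl_prod_mk (f := fun d x => PySem.Dict.insert d x true)
      (g := fun h x => heappushA h x)]
  rw [heapBuild]
  have hpw : (PySem.List.sorted a (fun x => x) false).Pairwise (· ≤ ·) := by
    have := PySem.List.sorted_pairwise a (fun x => x)
    simpa using this
  have hsub1 : ∀ x ∈ PySem.List.sorted a (fun x => x) false, x ∈ ([] : List Int) ++ a := by
    intro x hx
    simpa using (PySem.List.mem_sorted _ _ _ _).mp hx
  have hsub2 : ∀ v ∈ a, v ∉ ([] : List Int) → v ∈ PySem.List.sorted a (fun x => x) false :=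
    fun v hv _ => (PySem.List.mem_sorted _ _ _ _).mpr hv
  have hvis : ∀ x ∈ PySem.List.sorted a (fun x => x) false,
      (List.foldl (fun d x => d.insert x true) PySem.Dict.empty a).getD x false =
        !(decide (x ∈ ([] : List Int))) := by
    intro x hx
    rw [dictAll]
    have hxa : x ∈ a := (PySem.List.mem_sorted _ _ _ _).mp hx
    simp [hxa]
  have hlast : ∀ ℓ, a.getLast? = some ℓ → ℓ ∉ ([] : List Int) ∧ ℓ ∉ a.dropLast := by
    intro ℓ hℓ
    have hane : a ≠ [] := by
      intro hh
      rw [hh] at hℓ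
      cases hℓ
    have h2 := List.getLast?_eq_some_getLast hane
    rw [hℓ] at h2
    have hℓeq : ℓ = a.getLast hane := Option.some_inj.mp h2
    exact ⟨by simp, hℓeq ▸ hPre hane⟩
  have h := loopA a [] (List.foldl (fun d x => d.insert x true) PySem.Dict.empty a)
      (PySem.List.sorted a (fun x => x) false) 0 ((10:Int)^9) hpw hsub1 hsub2 hvis hlast
  simpa using h
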